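-- pv_equiv track=rewrite | github.com/sdharii/TIP102 | Unit 2/Week2Session1.py | num_VIP_guests
-- ===== SOURCE A (Python) =====
-- def num_VIP_guests(vip_passes, guests):
--     vip_set = set()
--
--     for char in vip_passes:
--         vip_set.add(char)
--
--     count = 0
--
--     for char in guests:
--         if char in vip_set:
--             count += 1
--     return count
-- ===== SOURCE B (Python) =====
-- def num_VIP_guests(vip_passes, guests):
--     counts = {}
--     for ch in guests:
--         counts[ch] = counts.get(ch, 0) + 1
--     total = 0
--     for ch in set(vip_passes):
--         total += counts.get(ch, 0)
--     return total
-- ===== Notes on version B (the rewrite author's own statement) =====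
-- stated objective: alternative
-- what changed: B reverses the indexing: it builds a frequency table of the guests string once and then sums the counts over the distinct VIP-pass characters, instead of building a set of VIP characters and scanning the guests against it.
import Mathlib
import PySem

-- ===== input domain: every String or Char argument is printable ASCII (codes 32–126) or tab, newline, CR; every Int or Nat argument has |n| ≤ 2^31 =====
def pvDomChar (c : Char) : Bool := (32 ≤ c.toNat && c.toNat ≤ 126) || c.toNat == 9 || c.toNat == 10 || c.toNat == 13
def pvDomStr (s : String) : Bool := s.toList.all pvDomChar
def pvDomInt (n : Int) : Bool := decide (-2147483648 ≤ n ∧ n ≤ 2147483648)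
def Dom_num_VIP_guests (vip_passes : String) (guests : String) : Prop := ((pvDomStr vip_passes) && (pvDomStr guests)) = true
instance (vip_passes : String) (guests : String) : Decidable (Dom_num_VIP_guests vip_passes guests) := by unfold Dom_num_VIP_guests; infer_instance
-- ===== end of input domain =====

-- B reverses the indexing: it builds a frequency table of the guests string once and then
-- sums the counts over the distinct VIP-pass characters (alternative decomposition, same cost).

-- ===== PORT A =====
def num_VIP_guests (vip_passes : String) (guests : String) : Int :=
  let vip_set : PySem.Set Char :=
    vip_passes.toList.foldl (fun s c => PySem.Set.add s c) PySem.Set.empty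
  guests.toList.foldl (fun count c => if PySem.Set.contains vip_set c then count + 1 else count) 0

-- ===== PORT B =====
def num_VIP_guests_alt (vip_passes : String) (guests : String) : Int :=
  let counts : PySem.Dict Char Int :=
    guests.toList.foldl (fun d c => d.insert c (d.getD c 0 + 1)) PySem.Dict.empty
  (PySem.Set.ofList vip_passes.toList).foldl (fun total c => total + counts.getD c 0) 0

-- ===== PRECONDITION & SPEC =====
def Spec_num_VIP_guests (vip_passes : String) (guests : String) (out : Int) : Prop := out = num_VIP_guests_alt vip_passes guests
instance (vip_passes : String) (guests : String) (out : Int) : Decidable (Spec_num_VIP_guests vip_passes guests out) := by unfold Spec_num_VIP_guests; infer_instance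

-- ===== CLAIM (what is proved, stated in full; the proofs are below) =====
def Claim_equal_num_VIP_guests : Prop := ∀ (vip_passes : String) (guests : String), Dom_num_VIP_guests vip_passes guests → Spec_num_VIP_guests vip_passes guests (num_VIP_guests vip_passes guests)

-- ===== LEMMAS AND PROOFS =====

-- B's frequency dict answers getD c 0 with the count of c in the scanned list.
theorem getD_count_dict (l : List Char) (d : PySem.Dict Char Int) (c : Char) :
    (l.foldl (fun d c => d.insert c (d.getD c 0 + 1)) d).getD c 0
      = d.getD c 0 + (l.count c : Int) := by
  induction l generalizing d with
  | nil => simp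
  | cons x xs ih =>
    simp only [List.foldl_cons, ih, PySem.Dict.getD_insert, List.count_cons]
    by_cases h : c = x
    · simp [h]; ring
    · simp [h]; exact fun hh => h hh.symm

-- counting members of a nodup list V inside g = summing per-character counts over V
theorem countP_cons_notmem (g : List Char) (c : Char) (V : List Char) (hc : c ∉ V) :
    g.countP (fun x => x ∈ (c :: V) : Char → Bool)
      = g.count c + g.countP (fun x => x ∈ V : Char → Bool) := by
  induction g with
  | nil => simp
  | cons y ys ih =>
    simp only [List.countP_cons, List.count_cons, ih]
    by_cases hy : y = c
    · subst hy
      have : (y ∈ V) = False := by simp [hc]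
      simp [List.mem_cons, this]; omega
    · by_cases hv : y ∈ V
      · simp [hy, hv]; omega
      · simp [hy, hv]

theorem count_members_eq_sum (g V : List Char) (hV : V.Nodup) :
    g.countP (fun x => x ∈ V : Char → Bool)
      = (V.map (fun c => g.count c)).sum := by
  induction V with
  | nil => simp
  | cons c V ih =>
    rcases List.nodup_cons.mp hV with ⟨hc, hV'⟩
    rw [countP_cons_notmem g c V hc, List.map_cons, List.sum_cons, ih hV']

theorem foldl_if_count (g : List Char) (V : List Char) (a : Int) :
    g.foldl (fun count c => if PySem.Set.contains V c then count + 1 else count) a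
      = a + (g.countP (fun x => x ∈ V : Char → Bool) : Int) := by
  induction g generalizing a with
  | nil => simp
  | cons x xs ih =>
    simp only [List.foldl_cons, List.countP_cons, ih]
    by_cases h : x ∈ V
    · simp [PySem.Set.contains, h]; ring
    · simp [PySem.Set.contains, h]

theorem foldl_sum_counts (V : List Char) (g : List Char) (a : Int)
    (counts : PySem.Dict Char Int)
    (hc : ∀ c, counts.getD c 0 = (g.count c : Int)) :
    V.foldl (fun total c => total + counts.getD c 0) a
      = a + ((V.map (fun c => g.count c)).sum : Int) := by
  induction V generalizing a with
  | nil => simp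
  | cons c V ih =>
    simp only [List.foldl_cons, List.map_cons, List.sum_cons]
    rw [hc, ih]; push_cast; ring

-- ===== VERDICT (by name: the statement is the Claim_ definition above) =====
theorem num_VIP_guests_spec : Claim_equal_num_VIP_guests := by
  intro vip guests _
  unfold Spec_num_VIP_guests num_VIP_guests num_VIP_guests_alt
  have hset : vip.toList.foldl (fun s c => PySem.Set.add s c) PySem.Set.empty
      = PySem.Set.ofList vip.toList := by
    rw [PySem.Set.ofList_eq_foldl]; rfl
  rw [hset, foldl_if_count,
    foldl_sum_counts (PySem.Set.ofList vip.toList) guests.toList 0 _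
      (fun c => by rw [getD_count_dict]; simp),
    count_members_eq_sum guests.toList _ (PySem.Set.nodup_ofList _)]
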